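-- pv_equiv track=rewrite | github.com/LZP-2020-1-0200/RealTime_PAAO | RealTime_PAAO/data/helpers.py | construct_spectra_filenames_dict
-- ===== SOURCE A (Python) =====
-- def construct_spectra_filenames_dict(name_of_first_spectrum):
--     number_of_zeros = name_of_first_spectrum.count('0') - 1
--     filename_start_letter = name_of_first_spectrum[:len(name_of_first_spectrum) - (number_of_zeros + 1)]
--
--     list_of_strings = []
--     list_of_keys = [10, 100, 1000, 10000, 100000, 1000000]
--     dict_of_names = {}
--     a = ""
--     list_of_strings.append(a)
--     for _ in range(0, number_of_zeros):
--         a += "0"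
--         list_of_strings.append(a)
--
--     list_of_ready_strings = [filename_start_letter + x for x in list_of_strings]
--
--     for k, v in zip(list_of_keys, reversed(list_of_ready_strings)):
--         dict_of_names[k] = v
--     return dict_of_names
-- ===== SOURCE B (Python) =====
-- def construct_spectra_filenames_dict(name_of_first_spectrum):
--     zeros = name_of_first_spectrum.count('0') - 1
--     prefix = name_of_first_spectrum[:len(name_of_first_spectrum) - zeros - 1]
--     result = {}
--     s = prefix + '0' * zeros
--     for key in (10, 100, 1000, 10000, 100000, 1000000):
--         result[key] = s
--         if s == prefix:
--             break
--         s = s[:-1]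
--     return result
-- ===== Notes on version B (the rewrite author's own statement) =====
-- stated objective: alternative
-- what changed: Instead of building a forward list of zero-strings, a ready-strings comprehension and a reversed zip into the dict, B keeps one working string (prefix plus all the zeros) and fills the dict in key order by peeling one trailing zero per key, breaking as soon as the bare prefix has been emitted.
import Mathlib
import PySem

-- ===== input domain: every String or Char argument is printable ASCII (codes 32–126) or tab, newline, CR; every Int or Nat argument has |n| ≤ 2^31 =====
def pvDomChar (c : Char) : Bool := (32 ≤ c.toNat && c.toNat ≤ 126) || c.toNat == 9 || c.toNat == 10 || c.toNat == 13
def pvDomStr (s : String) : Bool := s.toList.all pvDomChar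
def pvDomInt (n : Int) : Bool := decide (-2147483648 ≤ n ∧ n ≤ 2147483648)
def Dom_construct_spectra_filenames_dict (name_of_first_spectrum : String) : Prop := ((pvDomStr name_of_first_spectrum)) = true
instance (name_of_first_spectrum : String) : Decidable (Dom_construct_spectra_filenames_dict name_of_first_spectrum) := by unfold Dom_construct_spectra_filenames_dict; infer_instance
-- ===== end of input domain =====

-- B fills the dict in key order by peeling one trailing zero per key off a single working
-- string, breaking at the bare prefix, instead of A's list building + reversed zip (alternative).

-- ===== PORT A =====
-- Strings are handled as List Char internally (PySem.Chars is the exact model);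
-- String.ofList packs a value exactly where Python stores the ready string into the dict.
def construct_spectra_filenames_dict (name_of_first_spectrum : String) : List (Int × String) :=
  let number_of_zeros : Int := (PySem.Str.count name_of_first_spectrum "0" : Int) - 1
  let filename_start_letter : List Char :=
    PySem.List.slice name_of_first_spectrum.toList none
      (some (PySem.Str.len name_of_first_spectrum - (number_of_zeros + 1)))
  let list_of_keys : List Int := [10, 100, 1000, 10000, 100000, 1000000]
  -- a = ""; list_of_strings = [a]; for _ in range(0, number_of_zeros): a += "0"; append a
  let st : List Char × List (List Char) :=
    (PySem.List.pyRange 0 number_of_zeros 1).foldl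
      (fun st _ =>
        let a := st.1 ++ ['0']
        (a, st.2 ++ [a]))
      ([], [[]])
  let list_of_ready_strings : List String :=
    st.2.map (fun x => String.ofList (filename_start_letter ++ x))
  -- for k, v in zip(list_of_keys, reversed(list_of_ready_strings)): dict_of_names[k] = v
  let dict_of_names : PySem.Dict Int String :=
    (list_of_keys.zip list_of_ready_strings.reverse).foldl
      (fun d kv => d.insert kv.1 kv.2) PySem.Dict.empty
  dict_of_names.items

-- ===== PORT B =====
-- the key loop of Source B: assign the working string to the key, stop at the bare prefix,
-- else strip the last character (Python's s[:-1] = dropLast, exact also on the empty string)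
def bLoop (pre : List Char) : List Int → PySem.Dict Int String → List Char → PySem.Dict Int String
  | [], d, _ => d
  | k :: ks, d, s =>
      let d' := d.insert k (String.ofList s)
      if s == pre then d' else bLoop pre ks d' s.dropLast

def construct_spectra_filenames_dict_alt (name_of_first_spectrum : String) : List (Int × String) :=
  let zeros : Int := (PySem.Str.count name_of_first_spectrum "0" : Int) - 1
  let pre : List Char :=
    PySem.List.slice name_of_first_spectrum.toList none
      (some (PySem.Str.len name_of_first_spectrum - zeros - 1))
  (bLoop pre [10, 100, 1000, 10000, 100000, 1000000] PySem.Dict.empty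
      (pre ++ PySem.List.pyRepeat ['0'] zeros)).items

-- ===== PRECONDITION & SPEC =====
def Spec_construct_spectra_filenames_dict (name_of_first_spectrum : String) (out : List (Int × String)) : Prop := out = construct_spectra_filenames_dict_alt name_of_first_spectrum
instance (name_of_first_spectrum : String) (out : List (Int × String)) : Decidable (Spec_construct_spectra_filenames_dict name_of_first_spectrum out) := by unfold Spec_construct_spectra_filenames_dict; infer_instance

-- ===== CLAIM (what is proved, stated in full; the proofs are below) =====
def Claim_equal_construct_spectra_filenames_dict : Prop := ∀ (name_of_first_spectrum : String), Dom_construct_spectra_filenames_dict name_of_first_spectrum → Spec_construct_spectra_filenames_dict name_of_first_spectrum (construct_spectra_filenames_dict name_of_first_spectrum)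

-- ===== LEMMAS AND PROOFS =====

-- A's accumulation loop: after folding any list, `a` has gained one '0' per step and
-- the string list has gained the successive extensions of `a`.
theorem pvLoopA (l : List Int) (a : List Char) (acc : List (List Char)) :
    l.foldl (fun (st : List Char × List (List Char)) _ =>
        let a := st.1 ++ ['0']
        (a, st.2 ++ [a])) (a, acc)
      = (a ++ List.replicate l.length '0',
         acc ++ (List.range l.length).map (fun i => a ++ List.replicate (i + 1) '0')) := by
  induction l generalizing a acc with
  | nil => simp
  | cons x xs ih =>
      simp only [List.foldl_cons, List.length_cons, ih]
      refine Prod.ext ?_ ?_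
      · simp [List.replicate_succ, List.append_assoc]
      · simp only [List.range_succ_eq_map, List.map_cons, List.map_map]
        simp [List.replicate_succ, List.append_assoc, Function.comp]

-- the six keys zipped against the reverse of a (t+1)-long list
theorem pvZip (t : Nat) {α : Type} (g : Nat → α) :
    (([10, 100, 1000, 10000, 100000, 1000000] : List Int).zip
        (((List.range (t + 1)).map g).reverse))
      = (List.range (min 6 (t + 1))).map (fun i => ((10 : Int) ^ (i + 1), g (t - i))) := by
  apply List.ext_getElem
  · simp
  · intro i h1 h2
    simp only [List.getElem_zip, List.getElem_map, List.getElem_range, List.getElem_reverse,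
      List.length_map, List.length_range]
    have hi6 : i < 6 := by simp at h1; omega
    have hkey : (([10, 100, 1000, 10000, 100000, 1000000] : List Int))[i]'(by simpa using hi6)
        = (10 : Int) ^ (i + 1) := by
      interval_cases i <;> norm_num
    rw [hkey]
    have ht : t + 1 - 1 - i = t - i := by omega
    rw [ht]

-- the six keys zipped against a (t+1)-long list directly
theorem pvZipKeys (t : Nat) {α : Type} (g : Nat → α) :
    (([10, 100, 1000, 10000, 100000, 1000000] : List Int).zip ((List.range (t + 1)).map g))
      = (List.range (min 6 (t + 1))).map (fun i => ((10 : Int) ^ (i + 1), g i)) := by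
  apply List.ext_getElem
  · simp
  · intro i h1 h2
    simp only [List.getElem_zip, List.getElem_map, List.getElem_range,
      List.length_map, List.length_range]
    have hi6 : i < 6 := by simp at h1; omega
    have hkey : (([10, 100, 1000, 10000, 100000, 1000000] : List Int))[i]'(by simpa using hi6)
        = (10 : Int) ^ (i + 1) := by
      interval_cases i <;> norm_num
    rw [hkey]

theorem pvPowInj : Function.Injective (fun i : Nat => (10 : Int) ^ (i + 1)) := by
  have hm : StrictMono (fun i : Nat => (10 : Int) ^ (i + 1)) := by
    intro a b h
    exact pow_lt_pow_right₀ (by norm_num) (by omega)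
  exact hm.injective

-- B's peeling loop on a working string prefix ++ '0'*j equals a fold of inserts over
-- the keys zipped with the descending zero-strings
theorem pvBLoop (p : List Char) (ks : List Int) (j : Nat) (d : PySem.Dict Int String) :
    bLoop p ks d (p ++ List.replicate j '0')
      = (ks.zip ((List.range (j + 1)).map
            (fun i => String.ofList (p ++ List.replicate (j - i) '0')))).foldl
          (fun d kv => d.insert kv.1 kv.2) d := by
  induction ks generalizing j d with
  | nil => simp [bLoop]
  | cons k ks ih =>
      cases j with
      | zero => simp [bLoop]
      | succ m =>
          have hne : ((p ++ List.replicate (m + 1) '0') == p) = false := by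
            simp only [beq_eq_false_iff_ne]
            intro h
            have := congrArg List.length h
            simp at this
          have hdrop : (p ++ List.replicate (m + 1) '0').dropLast
              = p ++ List.replicate m '0' := by
            rw [List.replicate_succ', ← List.append_assoc]
            exact List.dropLast_concat
          simp only [bLoop, hne, hdrop, ih]
          have hranges : (List.range (m + 2)).map
              (fun i => String.ofList (p ++ List.replicate (m + 1 - i) '0'))
            = String.ofList (p ++ List.replicate (m + 1) '0')
              :: (List.range (m + 1)).map
                  (fun i => String.ofList (p ++ List.replicate (m - i) '0')) := by
            rw [List.range_succ_eq_map (n := m + 1), List.map_cons, List.map_map]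
            simp [Function.comp]
          rw [hranges]
          simp

-- the common target form: key 10^(i+1) ↦ prefix ++ '0'^(t-i), i < min 6 (t+1)
theorem pvA (t : Nat) (p : List Char) (z : Int)
    (hzz : PySem.List.pyRange 0 z 1 = (List.range t).map (fun k => Int.ofNat k)) :
    ((([10, 100, 1000, 10000, 100000, 1000000] : List Int).zip
        (((PySem.List.pyRange 0 z 1).foldl (fun (st : List Char × List (List Char)) _ =>
            let a := st.1 ++ ['0']; (a, st.2 ++ [a])) ([], [[]])).2.map
          (fun x => String.ofList (p ++ x))).reverse).foldl
        (fun d kv => d.insert kv.1 kv.2) PySem.Dict.empty).items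
      = (List.range (min 6 (t + 1))).map
          (fun i => ((10 : Int) ^ (i + 1), String.ofList (p ++ List.replicate (t - i) '0'))) := by
  rw [hzz, pvLoopA]
  simp only [List.nil_append, List.singleton_append, List.length_map, List.length_range]
  have hlist : (([] : List Char) :: (List.range t).map (fun i => List.replicate (i + 1) '0'))
      = (List.range (t + 1)).map (fun i => List.replicate i '0') := by
    simp [List.range_succ_eq_map, List.map_map, Function.comp, List.replicate_succ']
  rw [hlist, List.map_map, pvZip t]
  refine (PySem.Dict.items_foldl_insert_fresh _ _ _ _
    (by intro a _; exact PySem.Dict.contains_empty _)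
    (by rw [List.map_map]
        exact List.Nodup.map pvPowInj List.nodup_range)).trans ?_
  rw [show (PySem.Dict.empty : PySem.Dict Int String).items = [] from rfl, List.nil_append]
  simp [Function.comp]

theorem pvRangeNat (z : Int) (hz : -1 ≤ z) :
    PySem.List.pyRange 0 z 1 = (List.range z.toNat).map (fun k => Int.ofNat k) := by
  rw [PySem.List.pyRange_of_pos 0 z (by norm_num)]
  have h1 : (if (0 : Int) < z then ((z - 0 + 1 - 1) / 1).toNat else 0) = z.toNat := by
    split_ifs with h
    · have h2 : z - 0 + 1 - 1 = z := by ring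
      rw [h2, Int.ediv_one]
    · omega
  rw [h1]
  apply List.map_congr_left
  intro a _
  simp

theorem construct_spectra_filenames_dict_spec : Claim_equal_construct_spectra_filenames_dict := by
  intro name _
  unfold Spec_construct_spectra_filenames_dict
  unfold construct_spectra_filenames_dict construct_spectra_filenames_dict_alt
  simp only []
  set z : Int := (PySem.Str.count name "0" : Int) - 1 with hzdef
  have hz : -1 ≤ z := by
    have : 0 ≤ (PySem.Str.count name "0" : Int) := by positivity
    omega
  set t := z.toNat with htdef
  have hpre : PySem.Str.len name - (z + 1) = PySem.Str.len name - z - 1 := by ring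
  rw [hpre]
  set p : List Char :=
    PySem.List.slice name.toList none (some (PySem.Str.len name - z - 1)) with hpdef
  -- A side
  rw [pvA t p z (pvRangeNat z hz)]
  -- B side
  have hrep : PySem.List.pyRepeat ['0'] z = List.replicate t '0' := by
    rw [PySem.List.pyRepeat_singleton]
  rw [hrep, pvBLoop p _ t PySem.Dict.empty, pvZipKeys t]
  refine ((PySem.Dict.items_foldl_insert_fresh _ _ _ _
    (by intro a _; exact PySem.Dict.contains_empty _)
    (by rw [List.map_map]
        exact List.Nodup.map pvPowInj List.nodup_range)).trans ?_).symm
  rw [show (PySem.Dict.empty : PySem.Dict Int String).items = [] from rfl, List.nil_append]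
  simp
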